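-- pv_equiv track=rewrite | github.com/CDCgov/NEDSS-DataReporting | performance-testing/local-db-tracing/trace_db_cdc.py | normalize_table_entries
-- ===== SOURCE A (Python) =====
-- from typing import Iterable
--
-- def normalize_table_entries(entries: Iterable[dict[str, str]]) -> list[dict[str, str]]:
--     """Deduplicate and sort tracked-table lists so saved state remains deterministic between runs."""
--
--     seen: set[tuple[str, str]] = set()
--     normalized: list[dict[str, str]] = []
--     for entry in entries:
--         schema_name = entry.get("schema_name", "").strip()
--         table_name = entry.get("table_name", "").strip()
--         if not schema_name or not table_name:
--             continue
--         key = (schema_name, table_name)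
--         if key in seen:
--             continue
--         seen.add(key)
--         normalized.append({"schema_name": schema_name, "table_name": table_name})
--     normalized.sort(key=lambda item: (item["schema_name"], item["table_name"]))
--     return normalized
-- ===== SOURCE B (Python) =====
-- from typing import Iterable
--
-- def normalize_table_entries(entries: Iterable[dict[str, str]]) -> list[dict[str, str]]:
--     """Sort stripped valid (schema, table) tuples, then dedup by adjacency in one linear pass."""
--     tuples: list[tuple[str, str]] = []
--     for entry in entries:
--         schema_name = entry.get("schema_name", "").strip()
--         table_name = entry.get("table_name", "").strip()
--         if schema_name and table_name:
--             tuples.append((schema_name, table_name))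
--     tuples.sort()
--     result: list[dict[str, str]] = []
--     prev = None
--     for key in tuples:
--         if key != prev:
--             result.append({"schema_name": key[0], "table_name": key[1]})
--             prev = key
--     return result
-- ===== Notes on version B (the rewrite author's own statement) =====
-- stated objective: alternative
-- what changed: Replaces A's hash-set dedup-then-sort (seen set maintained inside the build loop, then a keyed sort of dicts) by sort-then-adjacent-dedup: collect the stripped valid (schema, table) tuples, sort the tuple list, and one linear pass with a previous-key variable emits each dict once, eliminating the seen set. Pre_ excludes only association lists binding a tracked field twice, which represent no Python dict.
import Mathlib
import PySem

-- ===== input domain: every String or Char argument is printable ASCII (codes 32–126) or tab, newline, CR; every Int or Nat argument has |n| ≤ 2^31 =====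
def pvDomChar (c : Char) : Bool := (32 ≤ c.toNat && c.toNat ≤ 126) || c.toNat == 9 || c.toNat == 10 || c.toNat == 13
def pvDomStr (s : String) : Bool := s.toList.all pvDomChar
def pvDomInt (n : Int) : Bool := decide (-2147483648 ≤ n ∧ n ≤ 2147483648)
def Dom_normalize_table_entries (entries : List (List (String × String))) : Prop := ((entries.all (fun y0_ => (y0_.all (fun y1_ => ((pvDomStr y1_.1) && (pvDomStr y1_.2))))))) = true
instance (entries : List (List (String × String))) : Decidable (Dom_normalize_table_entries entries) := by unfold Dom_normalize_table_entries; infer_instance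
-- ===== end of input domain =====

-- B replaces the seen-set dedup-then-sort by sort-then-adjacent-dedup (alternative decomposition, same cost).

-- shared helpers of both ports: first-match association-list lookup (= dict.get with default),
-- the stripped (schema, table) key of an entry, and the output dict
def pvGetD (d : List (String × String)) (k : String) (dflt : String) : String :=
  ((d.find? (fun p => p.1 == k)).map Prod.snd).getD dflt

def pvExt (entry : List (String × String)) : String × String :=
  (PySem.Str.strip (pvGetD entry "schema_name" ""),
   PySem.Str.strip (pvGetD entry "table_name" ""))

def mkRow (k : String × String) : List (String × String) :=
  [("schema_name", k.1), ("table_name", k.2)]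

-- ===== PORT A =====
-- item["schema_name"] in the sort key is ported as getD with default "": the key is always present in the rows A builds
def normalize_table_entries (entries : List (List (String × String))) : List (List (String × String)) :=
  let st := entries.foldl
    (fun (st : PySem.Set (String × String) × List (List (String × String))) entry =>
      let k := pvExt entry
      if k.1 = "" ∨ k.2 = "" then st
      else if PySem.Set.contains st.1 k then st
      else (PySem.Set.add st.1 k, st.2 ++ [mkRow k]))
    (PySem.Set.empty, [])
  PySem.List.sorted2 st.2
    (fun item => pvGetD item "schema_name" "")
    (fun item => pvGetD item "table_name" "") false

-- ===== PORT B =====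
def normalize_table_entries_alt (entries : List (List (String × String))) : List (List (String × String)) :=
  let tuples := entries.foldl
    (fun (acc : List (String × String)) entry =>
      let k := pvExt entry
      if k.1 ≠ "" ∧ k.2 ≠ "" then acc ++ [k] else acc) []
  let sortedT := PySem.List.sorted2 tuples (fun x => x.1) (fun x => x.2) false
  (sortedT.foldl
    (fun (st : Option (String × String) × List (List (String × String))) k =>
      if st.1 = some k then st else (some k, st.2 ++ [mkRow k]))
    (none, [])).2

-- ===== PRECONDITION & SPEC =====
-- Pre_ excludes association lists that bind "schema_name" or "table_name" twice in one entry: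
-- they represent no Python dict (a dict binds a key at most once), so the first-match convention
-- there is a modelling artefact, not a behaviour of A.
def Pre_normalize_table_entries (entries : List (List (String × String))) : Prop :=
  ∀ e ∈ entries, (e.filter (fun p => p.1 == "schema_name")).length ≤ 1
    ∧ (e.filter (fun p => p.1 == "table_name")).length ≤ 1
instance (entries : List (List (String × String))) : Decidable (Pre_normalize_table_entries entries) := by unfold Pre_normalize_table_entries; infer_instance

def pvWitness_normalize_table_entries : (List (List (String × String))) :=
  [[("schema_name", " s "), ("table_name", "t")], [("schema_name", "s"), ("table_name", "t")]]

def Spec_normalize_table_entries (entries : List (List (String × String))) (out : List (List (String × String))) : Prop := out = normalize_table_entries_alt entries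
instance (entries : List (List (String × String))) (out : List (List (String × String))) : Decidable (Spec_normalize_table_entries entries out) := by unfold Spec_normalize_table_entries; infer_instance

-- ===== CLAIM (what is proved, stated in full; the proofs are below) =====
def Claim_equal_normalize_table_entries : Prop := ∀ (entries : List (List (String × String))), Dom_normalize_table_entries entries → Pre_normalize_table_entries entries → Spec_normalize_table_entries entries (normalize_table_entries entries)

-- ===== LEMMAS AND PROOFS =====

-- the list of stripped valid keys, in input order (B's `tuples`)
def keyList (entries : List (List (String × String))) : List (String × String) :=
  (entries.filter (fun e => decide ((pvExt e).1 ≠ "" ∧ (pvExt e).2 ≠ ""))).map pvExt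

-- adjacent-dedup with a "previous" register (the pure form of B's second loop)
def adj : Option (String × String) → List (String × String) → List (String × String)
  | _, [] => []
  | prev, x :: xs => if prev = some x then adj prev xs else x :: adj (some x) xs

def lexKey (k : String × String) : Lex (String × String) := toLex k

@[simp] lemma kS_mkRow (k : String × String) :
    pvGetD (mkRow k) "schema_name" "" = k.1 := rfl

@[simp] lemma kT_mkRow (k : String × String) :
    pvGetD (mkRow k) "table_name" "" = k.2 := rfl

lemma before_eq :
    (fun a b : String × String =>
        (decide (a.1 < b.1) || (!decide (b.1 < a.1) && decide (a.2 < b.2))))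
      = fun a b => decide (lexKey a < lexKey b) := by
  funext a b
  have h : (lexKey a < lexKey b) ↔ (a.1 < b.1 ∨ (a.1 = b.1 ∧ a.2 < b.2)) := Prod.Lex.lt_iff
  rcases lt_trichotomy a.1 b.1 with h1 | h1 | h1
  · simp [h, h1, not_lt_of_gt h1]
  · simp [h, h1]
  · simp [h, h1, not_lt_of_gt h1, ne_of_gt h1]

lemma sorted2_eq_sorted_lex (xs : List (String × String)) :
    PySem.List.sorted2 xs (fun x => x.1) (fun x => x.2) false
      = PySem.List.sorted xs lexKey false := by
  rw [PySem.List.sorted_eq_foldl_insertBy]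
  show List.foldl _ [] xs = _
  rw [← before_eq]
  rfl

lemma insertBy_map {α β : Type} (f : α → β) (bf : α → α → Bool) (bf' : β → β → Bool)
    (h : ∀ a b, bf' (f a) (f b) = bf a b) (x : α) (l : List α) :
    PySem.List.insertBy bf' (f x) (l.map f) = (PySem.List.insertBy bf x l).map f := by
  induction l with
  | nil => rfl
  | cons y ys ih =>
      simp only [List.map_cons, PySem.List.insertBy, h]
      by_cases hb : bf x y
      · simp [hb]
      · simp [hb, ih]

lemma foldl_insertBy_map {α β : Type} (f : α → β) (bf : α → α → Bool) (bf' : β → β → Bool)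
    (h : ∀ a b, bf' (f a) (f b) = bf a b) (l : List α) (acc : List α) :
    (l.map f).foldl (fun a x => PySem.List.insertBy bf' x a) (acc.map f)
      = (l.foldl (fun a x => PySem.List.insertBy bf x a) acc).map f := by
  induction l generalizing acc with
  | nil => rfl
  | cons y ys ih =>
      simp only [List.map_cons, List.foldl_cons]
      rw [insertBy_map f bf bf' h, ih]

lemma sorted2_map (l : List (String × String)) :
    PySem.List.sorted2 (l.map mkRow)
        (fun item => pvGetD item "schema_name" "")
        (fun item => pvGetD item "table_name" "") false
      = (PySem.List.sorted2 l (fun x => x.1) (fun x => x.2) false).map mkRow := by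
  have h : ∀ a b : String × String,
      (fun x y : List (String × String) =>
        (decide (pvGetD x "schema_name" "" < pvGetD y "schema_name" "") ||
          (!decide (pvGetD y "schema_name" "" < pvGetD x "schema_name" "") &&
            decide (pvGetD x "table_name" "" < pvGetD y "table_name" "")))) (mkRow a) (mkRow b)
        = (fun x y : String × String =>
            (decide (x.1 < y.1) || (!decide (y.1 < x.1) && decide (x.2 < y.2)))) a b := by
    intro a b; rfl
  have := foldl_insertBy_map mkRow
    (fun x y : String × String =>
      (decide (x.1 < y.1) || (!decide (y.1 < x.1) && decide (x.2 < y.2))))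
    (fun x y : List (String × String) =>
      (decide (pvGetD x "schema_name" "" < pvGetD y "schema_name" "") ||
        (!decide (pvGetD y "schema_name" "" < pvGetD x "schema_name" "") &&
          decide (pvGetD x "table_name" "" < pvGetD y "table_name" "")))) h l []
  rw [List.map_nil] at this
  exact this

lemma adj_pairwise (xs : List (String × String)) (p : String × String)
    (hpw : xs.Pairwise (fun a b => lexKey a ≤ lexKey b))
    (hp : ∀ y ∈ xs, lexKey p ≤ lexKey y) :
    (adj (some p) xs).Pairwise (fun a b => lexKey a < lexKey b)
      ∧ ∀ y ∈ adj (some p) xs, lexKey p < lexKey y := by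
  induction xs generalizing p with
  | nil => exact ⟨List.Pairwise.nil, by simp [adj]⟩
  | cons x xs ih =>
      rcases List.pairwise_cons.1 hpw with ⟨hx, hxs⟩
      by_cases hpx : p = x
      · subst hpx
        simp only [adj, if_pos rfl]
        exact ih p hxs hx
      · have hcond : ¬ (some p = some x) := by simpa using hpx
        simp only [adj, if_neg hcond]
        obtain ⟨h1, h2⟩ := ih x hxs hx
        have hpxk : lexKey p < lexKey x := by
          refine lt_of_le_of_ne (hp x (by simp)) (fun he => hpx ?_)
          exact toLex_inj.1 he
        refine ⟨List.pairwise_cons.2 ⟨h2, h1⟩, ?_⟩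
        intro y hy
        rcases List.mem_cons.1 hy with rfl | hy
        · exact hpxk
        · exact hpxk.trans (h2 y hy)

lemma adj_subset (prev : Option (String × String)) (xs : List (String × String)) :
    ∀ x ∈ adj prev xs, x ∈ xs := by
  induction xs generalizing prev with
  | nil => simp [adj]
  | cons y ys ih =>
      intro x hx
      simp only [adj] at hx
      split_ifs at hx with h
      · exact List.mem_cons_of_mem _ (ih prev x hx)
      · rcases List.mem_cons.1 hx with rfl | hx
        · exact List.mem_cons_self
        · exact List.mem_cons_of_mem _ (ih (some y) x hx)

lemma mem_adj (xs : List (String × String)) (p x : String × String) (hx : x ∈ xs) :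
    x ∈ adj (some p) xs ∨ x = p := by
  induction xs generalizing p with
  | nil => cases hx
  | cons y ys ih =>
      by_cases hpy : p = y
      · subst hpy
        simp only [adj, if_pos rfl]
        rcases List.mem_cons.1 hx with rfl | hx
        · exact Or.inr rfl
        · exact ih p hx
      · have hcond : ¬ (some p = some y) := by simpa using hpy
        simp only [adj, if_neg hcond]
        rcases List.mem_cons.1 hx with rfl | hx
        · exact Or.inl List.mem_cons_self
        · rcases ih y hx with h | rfl
          · exact Or.inl (List.mem_cons_of_mem _ h)
          · exact Or.inl List.mem_cons_self

lemma ofList_append_singleton (ks : List (String × String)) (k : String × String) :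
    PySem.Set.ofList (ks ++ [k]) = PySem.Set.add (PySem.Set.ofList ks) k := by
  rw [PySem.Set.ofList_eq_foldl, PySem.Set.ofList_eq_foldl, List.foldl_append]
  rfl

lemma foldA (l : List (List (String × String))) (ks : List (String × String)) :
    l.foldl
      (fun (st : PySem.Set (String × String) × List (List (String × String))) entry =>
        if (pvExt entry).1 = "" ∨ (pvExt entry).2 = "" then st
        else if PySem.Set.contains st.1 (pvExt entry) then st
        else (PySem.Set.add st.1 (pvExt entry), st.2 ++ [mkRow (pvExt entry)]))
      (PySem.Set.ofList ks, (PySem.Set.ofList ks).map mkRow)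
    = (PySem.Set.ofList (ks ++ keyList l), (PySem.Set.ofList (ks ++ keyList l)).map mkRow) := by
  induction l generalizing ks with
  | nil => simp [keyList]
  | cons e l ih =>
      simp only [List.foldl_cons]
      by_cases hv : (pvExt e).1 = "" ∨ (pvExt e).2 = ""
      · rw [if_pos hv]
        have hk : keyList (e :: l) = keyList l := by
          simp only [keyList, List.filter_cons]
          rw [if_neg (by simp only [decide_eq_true_eq]; tauto)]
        rw [ih ks, hk]
      · rw [if_neg hv]
        push_neg at hv
        have hk : keyList (e :: l) = pvExt e :: keyList l := by
          simp only [keyList, List.filter_cons]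
          rw [if_pos (by simp only [decide_eq_true_eq]; tauto)]
          rfl
        have hsplit : ks ++ keyList (e :: l) = ks ++ [pvExt e] ++ keyList l := by
          rw [hk, List.append_cons]
        by_cases hc : PySem.Set.contains (PySem.Set.ofList ks) (pvExt e)
        · rw [if_pos hc]
          have hm : pvExt e ∈ ks :=
            (PySem.Set.mem_ofList ks _).1 ((PySem.Set.contains_iff _ _).1 hc)
          have hadd : PySem.Set.ofList (ks ++ [pvExt e]) = PySem.Set.ofList ks := by
            rw [ofList_append_singleton]
            simp [PySem.Set.add, hc, hm]
          have hih := ih (ks ++ [pvExt e])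
          rw [hadd] at hih
          rw [hsplit]
          exact hih
        · rw [if_neg hc]
          have hm : pvExt e ∉ ks := fun hmem =>
            hc ((PySem.Set.contains_iff _ _).2 ((PySem.Set.mem_ofList ks _).2 hmem))
          have hadd : PySem.Set.ofList (ks ++ [pvExt e])
              = PySem.Set.ofList ks ++ [pvExt e] := by
            rw [ofList_append_singleton]
            simp [PySem.Set.add, hc, hm]
          have hst : (PySem.Set.add (PySem.Set.ofList ks) (pvExt e),
                (PySem.Set.ofList ks).map mkRow ++ [mkRow (pvExt e)])
              = (PySem.Set.ofList (ks ++ [pvExt e]),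
                (PySem.Set.ofList (ks ++ [pvExt e])).map mkRow) := by
            rw [hadd]
            simp [PySem.Set.add, hc, hm]
          rw [hst, ih (ks ++ [pvExt e]), hsplit]

lemma foldB (l : List (String × String)) (prev : Option (String × String))
    (out : List (List (String × String))) :
    (l.foldl
      (fun (st : Option (String × String) × List (List (String × String))) k =>
        if st.1 = some k then st else (some k, st.2 ++ [mkRow k]))
      (prev, out)).2 = out ++ (adj prev l).map mkRow := by
  induction l generalizing prev out with
  | nil => simp [adj]
  | cons k l ih =>
      simp only [List.foldl_cons]
      by_cases h : prev = some k
      · rw [if_pos h]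
        simp only [adj, if_pos h]
        exact ih prev out
      · rw [if_neg h]
        simp only [adj, if_neg h]
        rw [ih (some k) (out ++ [mkRow k])]
        simp

lemma adj_nodup_sorted_eq (ks : List (String × String)) :
    adj none (PySem.List.sorted ks lexKey false)
      = PySem.List.sorted (PySem.Set.ofList ks) lexKey false := by
  set S := PySem.List.sorted ks lexKey false with hS
  have hpwS : S.Pairwise (fun a b => lexKey a ≤ lexKey b) := PySem.List.sorted_pairwise ks lexKey
  have hadj : (adj none S).Pairwise (fun a b => lexKey a < lexKey b) := by
    cases hSc : S with
    | nil => simp [adj]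
    | cons x xs =>
        rw [hSc] at hpwS
        rcases List.pairwise_cons.1 hpwS with ⟨hx, hxs⟩
        have : adj none (x :: xs) = x :: adj (some x) xs := by
          simp [adj]
        rw [this]
        obtain ⟨h1, h2⟩ := adj_pairwise xs x hxs hx
        exact List.pairwise_cons.2 ⟨fun y hy => h2 y hy, h1⟩
  have hmem : ∀ x, x ∈ adj none S ↔ x ∈ S := by
    intro x
    constructor
    · exact adj_subset none S x
    · intro hx
      cases hSc : S with
      | nil => rw [hSc] at hx; cases hx
      | cons y ys =>
          rw [hSc] at hx
          have : adj none (y :: ys) = y :: adj (some y) ys := by simp [adj]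
          rw [this]
          rcases List.mem_cons.1 hx with rfl | hx
          · exact List.mem_cons_self
          · rcases mem_adj ys y x hx with h | rfl
            · exact List.mem_cons_of_mem _ h
            · exact List.mem_cons_self
  have hnodup : (adj none S).Nodup := by
    refine List.Pairwise.imp ?_ hadj
    intro a b hab heq
    exact absurd (heq ▸ hab) (lt_irrefl _)
  have hperm : (adj none S).Perm (PySem.Set.ofList ks) := by
    rw [List.perm_ext_iff_of_nodup hnodup (PySem.Set.nodup_ofList ks)]
    intro a
    rw [hmem a, PySem.Set.mem_ofList, hS, PySem.List.mem_sorted]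
  exact (PySem.List.sorted_eq_of_perm_of_pairwise_lt _ _ _ hperm hadj).symm

lemma altB (entries : List (List (String × String))) :
    normalize_table_entries_alt entries
      = (PySem.List.sorted (PySem.Set.ofList (keyList entries)) lexKey false).map mkRow := by
  unfold normalize_table_entries_alt
  have htup : entries.foldl
      (fun (acc : List (String × String)) entry =>
        if (pvExt entry).1 ≠ "" ∧ (pvExt entry).2 ≠ "" then acc ++ [pvExt entry] else acc) []
      = keyList entries := by
    have := PySem.List.foldl_append_ite
      (fun e => (pvExt e).1 ≠ "" ∧ (pvExt e).2 ≠ "") pvExt entries []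
    simpa [keyList] using this
  simp only []
  rw [htup, foldB, sorted2_eq_sorted_lex, adj_nodup_sorted_eq]
  simp

lemma mainA (entries : List (List (String × String))) :
    normalize_table_entries entries
      = (PySem.List.sorted (PySem.Set.ofList (keyList entries)) lexKey false).map mkRow := by
  unfold normalize_table_entries
  have h0 : (PySem.Set.empty, ([] : List (List (String × String))))
      = (PySem.Set.ofList ([] : List (String × String)),
         (PySem.Set.ofList ([] : List (String × String))).map mkRow) := rfl
  simp only []
  rw [h0, foldA entries [], List.nil_append]
  rw [sorted2_map, sorted2_eq_sorted_lex]

-- ===== VERDICT (by name: the statement is the Claim_ definition above) =====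
theorem normalize_table_entries_spec : Claim_equal_normalize_table_entries := by
  intro entries _ _
  show normalize_table_entries entries = normalize_table_entries_alt entries
  rw [mainA, altB]
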